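-- pv_equiv track=rewrite | github.com/AV-Davalo/Passonomicon | Passonomicon.py | generate_variations
-- ===== SOURCE A (Python) =====
-- from itertools import product
--
-- def generate_variations(base_name):
--     variations = []
--     variations.append(base_name.lower())
--     variations.append(base_name.upper())
--     variations.append(base_name.capitalize())
--     char_replacements = {
--         'a': ['a', '@'],
--         'i': ['i', '1'],
--         'o': ['o', '0'],
--         'e': ['e', '3']
--     }
--     replacement_combinations = [char_replacements.get(char, [char]) for char in base_name]
--     for combo in product(*replacement_combinations):
--         variations.append(''.join(combo))
--     return variations
-- ===== SOURCE B (Python) =====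
-- def generate_variations(base_name):
--     leet = {'a': '@', 'i': '1', 'o': '0', 'e': '3'}
--     m = sum(1 for ch in base_name if ch in leet)
--     variations = [base_name.lower(), base_name.upper(), base_name.capitalize()]
--     for mask in range(1 << m):
--         out = []
--         j = 0
--         for ch in base_name:
--             if ch in leet:
--                 j += 1
--                 out.append(leet[ch] if (mask >> (m - j)) & 1 else ch)
--             else:
--                 out.append(ch)
--         variations.append(''.join(out))
--     return variations
-- ===== Notes on version B (the rewrite author's own statement) =====
-- stated objective: alternative
-- what changed: Replaces the per-character option lists fed to itertools.product by bitmask enumeration: count the m leetable characters, then for each mask in range(2^m) rebuild the string once, substituting the j-th leetable character exactly when bit m-j of the mask is set.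
import Mathlib
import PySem

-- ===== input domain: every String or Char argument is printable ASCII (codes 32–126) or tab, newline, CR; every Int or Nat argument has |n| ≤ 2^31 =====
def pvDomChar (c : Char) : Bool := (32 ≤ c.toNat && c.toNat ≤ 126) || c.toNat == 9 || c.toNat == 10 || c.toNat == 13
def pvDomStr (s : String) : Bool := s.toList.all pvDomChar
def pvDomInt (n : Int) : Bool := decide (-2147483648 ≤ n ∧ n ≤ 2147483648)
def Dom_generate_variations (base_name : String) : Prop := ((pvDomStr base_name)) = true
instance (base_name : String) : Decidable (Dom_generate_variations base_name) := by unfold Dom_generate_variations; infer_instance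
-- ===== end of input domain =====

-- B replaces itertools.product over per-character option lists by bitmask enumeration
-- (count the m leetable characters, rebuild the string once per mask in range(2^m)); same output, same order.

-- shared Python-builtin helper: str.capitalize() (exact on ASCII: first char uppercased, rest lowered)
def pyCapitalize (s : String) : String :=
  match s.toList with
  | [] => ""
  | c :: rest => String.ofList (PySem.Chars.upperChar c :: PySem.Chars.lower rest)

-- ===== PORT A =====
-- A's char_replacements dict: .get(char, [char])
def gvOpts (c : Char) : List Char :=
  (PySem.Dict.mk [('a', ['a', '@']), ('i', ['i', '1']), ('o', ['o', '0']), ('e', ['e', '3'])]).getD c [c]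

-- itertools.product(*lists): leftmost factor varies slowest, transliterated as structural recursion
def gvProduct : List (List Char) → List (List Char)
  | [] => [[]]
  | l :: ls => l.flatMap (fun o => (gvProduct ls).map (o :: ·))

def generate_variations (base_name : String) : List String :=
  -- ''.join(combo) over one-char strings = String.ofList combo (exact)
  [PySem.Str.lower base_name, PySem.Str.upper base_name, pyCapitalize base_name] ++
    (gvProduct (base_name.toList.map gvOpts)).map (fun combo => String.ofList combo)

-- ===== PORT B =====
-- B's leet dict: single replacement char per key
def gvLeet : PySem.Dict Char Char :=
  PySem.Dict.mk [('a', '@'), ('i', '1'), ('o', '0'), ('e', '3')]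

-- m = sum(1 for ch in base_name if ch in leet)
def gvCount (cs : List Char) : Nat := cs.countP (fun c => (gvLeet.get? c).isSome)

-- the inner loop of B: out/j accumulator over the characters; masks are nonnegative, so the
-- Python ints mask and j are carried as Nat ((mask >> (m - j)) & 1 is exact on them)
def gvRow (m : Nat) (mask : Nat) (cs : List Char) : List Char :=
  (cs.foldl (fun (acc : List Char × Nat) c =>
      match gvLeet.get? c with
      | some r => (acc.1 ++ [if (mask >>> (m - (acc.2 + 1))) &&& 1 == 1 then r else c], acc.2 + 1)
      | none => (acc.1 ++ [c], acc.2)) ([], 0)).1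

def generate_variations_alt (base_name : String) : List String :=
  let cs := base_name.toList
  let m := gvCount cs
  [PySem.Str.lower base_name, PySem.Str.upper base_name, pyCapitalize base_name] ++
    (List.range (2 ^ m)).map (fun mask => String.ofList (gvRow m mask cs))

-- ===== PRECONDITION & SPEC =====
def Spec_generate_variations (base_name : String) (out : List String) : Prop := out = generate_variations_alt base_name
instance (base_name : String) (out : List String) : Decidable (Spec_generate_variations base_name out) := by unfold Spec_generate_variations; infer_instance

-- ===== CLAIM (what is proved, stated in full; the proofs are below) =====
def Claim_equal_generate_variations : Prop := ∀ (base_name : String), Dom_generate_variations base_name → Spec_generate_variations base_name (generate_variations base_name)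

-- ===== LEMMAS AND PROOFS =====

-- reference: substitute one bit per leetable character, MSB-first bit list
def gvBuildR : List Char → List Bool → List Char
  | [], _ => []
  | c :: cs, bs =>
    match gvLeet.get? c with
    | some r =>
      match bs with
      | b :: bs' => (if b then r else c) :: gvBuildR cs bs'
      | [] => c :: gvBuildR cs []
    | none => c :: gvBuildR cs bs

-- the low n bits of mask, MSB first
def gvBits (mask : Nat) : Nat → List Bool
  | 0 => []
  | n + 1 => mask.testBit n :: gvBits mask n

theorem gvBit_cond (n k : Nat) : ((n >>> k) &&& 1 == 1) = n.testBit k := by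
  simp [Nat.testBit, Nat.and_one_is_mod, Nat.one_and_eq_mod_two]

theorem gvOpts_eq (c : Char) :
    gvOpts c = match gvLeet.get? c with | some r => [c, r] | none => [c] := by
  by_cases h1 : c = 'a'; · subst h1; decide
  by_cases h2 : c = 'i'; · subst h2; decide
  by_cases h3 : c = 'o'; · subst h3; decide
  by_cases h4 : c = 'e'; · subst h4; decide
  have e1 : ('a' == c) = false := by simp [Ne.symm h1]
  have e2 : ('i' == c) = false := by simp [Ne.symm h2]
  have e3 : ('o' == c) = false := by simp [Ne.symm h3]
  have e4 : ('e' == c) = false := by simp [Ne.symm h4]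
  simp [gvOpts, gvLeet, PySem.Dict.getD, PySem.Dict.get?, List.find?, e1, e2, e3, e4]

theorem gvCount_cons_none {c : Char} (hc : gvLeet.get? c = none) (cs : List Char) :
    gvCount (c :: cs) = gvCount cs := by simp [gvCount, hc]

theorem gvCount_cons_some {c r : Char} (hc : gvLeet.get? c = some r) (cs : List Char) :
    gvCount (c :: cs) = gvCount cs + 1 := by simp [gvCount, hc]

theorem gvBits_add_pow {k n : Nat} (_hk : k < 2 ^ n) :
    ∀ i, i ≤ n → gvBits (2 ^ n + k) i = gvBits k i := by
  intro i
  induction i with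
  | zero => intro _; rfl
  | succ j ih =>
    intro hj
    simp [gvBits, ih (by omega), Nat.testBit_two_pow_add_gt (by omega : j < n) k]

theorem gvRow_fold (mask : Nat) (cs : List Char) : ∀ (out : List Char) (j m : Nat),
    j + gvCount cs = m →
    (cs.foldl (fun (acc : List Char × Nat) c =>
      match gvLeet.get? c with
      | some r => (acc.1 ++ [if (mask >>> (m - (acc.2 + 1))) &&& 1 == 1 then r else c], acc.2 + 1)
      | none => (acc.1 ++ [c], acc.2)) (out, j)).1
      = out ++ gvBuildR cs (gvBits mask (gvCount cs)) := by
  induction cs with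
  | nil => intro out j m _; simp [gvBuildR]
  | cons c cs ih =>
    intro out j m hm
    simp only [gvBit_cond] at ih ⊢
    cases hc : gvLeet.get? c with
    | none =>
      rw [gvCount_cons_none hc] at hm ⊢
      simp only [List.foldl_cons, hc]
      rw [ih (out ++ [c]) j m hm]
      simp [gvBuildR, hc]
    | some r =>
      rw [gvCount_cons_some hc] at hm ⊢
      have hsub : m - (j + 1) = gvCount cs := by omega
      simp only [List.foldl_cons, hc, hsub]
      rw [ih _ (j + 1) m (by omega)]
      simp [gvBuildR, hc, gvBits]

theorem gvProduct_eq_masks (cs : List Char) :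
    gvProduct (cs.map gvOpts)
      = (List.range (2 ^ gvCount cs)).map (fun mask => gvBuildR cs (gvBits mask (gvCount cs))) := by
  induction cs with
  | nil => simp [gvProduct, gvCount, gvBuildR, List.range_one]
  | cons c cs ih =>
    rw [List.map_cons, gvProduct, gvOpts_eq c]
    cases hc : gvLeet.get? c with
    | none =>
      rw [gvCount_cons_none hc, ih, List.flatMap_cons, List.flatMap_nil, List.append_nil,
        List.map_map]
      refine List.map_congr_left fun mask _ => ?_
      simp [gvBuildR, hc]
    | some r =>
      rw [gvCount_cons_some hc, ih]
      have hsplit : 2 ^ (gvCount cs + 1) = 2 ^ gvCount cs + 2 ^ gvCount cs := by ring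
      rw [hsplit, List.range_add, List.map_append, List.map_map,
        List.flatMap_cons, List.flatMap_cons, List.flatMap_nil, List.append_nil, List.map_map]
      congr 1
      · refine List.map_congr_left fun mask hmask => ?_
        have hlt : mask < 2 ^ gvCount cs := List.mem_range.mp hmask
        simp [Function.comp, gvBuildR, hc, gvBits, Nat.testBit_lt_two_pow hlt]
      · rw [List.map_map]
        refine List.map_congr_left fun k hkmem => ?_
        have hlt : k < 2 ^ gvCount cs := List.mem_range.mp hkmem
        have htop : (2 ^ gvCount cs + k).testBit (gvCount cs) = true := by
          simp [Nat.testBit_two_pow_add_eq, Nat.testBit_lt_two_pow hlt]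
        simp [Function.comp, gvBuildR, hc, gvBits, htop, gvBits_add_pow hlt _ le_rfl]

theorem gvRow_eq (m mask : Nat) (cs : List Char) (hm : m = gvCount cs) :
    gvRow m mask cs = gvBuildR cs (gvBits mask (gvCount cs)) := by
  subst hm
  unfold gvRow
  rw [gvRow_fold mask cs [] 0 (gvCount cs) (by omega), List.nil_append]

-- ===== VERDICT (by name: the statement is the Claim_ definition above) =====
theorem generate_variations_spec : Claim_equal_generate_variations := by
  intro s _
  unfold Spec_generate_variations generate_variations generate_variations_alt
  rw [gvProduct_eq_masks, List.map_map]
  refine congrArg _ (List.map_congr_left fun mask _ => ?_)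
  rw [Function.comp_apply, gvRow_eq _ _ _ rfl]
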